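-- pv_equiv track=rewrite | github.com/mkrashad/master-thesis | dijkstra-mpi.py | find_local_min
-- ===== SOURCE A (Python) =====
-- def find_local_min(graph):
--     min_value = None
--     remove_zero = {}
--     new_arr = {}
--     for key, value in graph.items():
--         if value != 0:
--             remove_zero.update({key: value})
--             min_value = min(remove_zero.values())
--             if value == min_value:
--                 new_arr.update({key: value})
--     return new_arr
-- ===== SOURCE B (Python) =====
-- def find_local_min(graph):
--     # pass 1: non-zero (key, value) pairs in insertion order
--     pairs = [(k, v) for k, v in graph.items() if v != 0]
--     # pass 2: prefix-minimum table of the values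
--     mins = []
--     running = None
--     for _, v in pairs:
--         running = v if running is None else min(running, v)
--         mins.append(running)
--     # pass 3: keep exactly the pairs whose value equals its prefix minimum
--     return {k: v for (k, v), m in zip(pairs, mins) if v == m}
-- ===== Notes on version B (the rewrite author's own statement) =====
-- stated objective: faster
-- what changed: A recomputes min() over the whole growing dict of non-zero values at every step (quadratic); B makes three separate passes: filter the non-zero pairs, build a prefix-minimum table of their values, then select the pairs whose value equals its prefix minimum. Pre_ only requires distinct keys, which every Python dict argument has by construction.
import Mathlib
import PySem

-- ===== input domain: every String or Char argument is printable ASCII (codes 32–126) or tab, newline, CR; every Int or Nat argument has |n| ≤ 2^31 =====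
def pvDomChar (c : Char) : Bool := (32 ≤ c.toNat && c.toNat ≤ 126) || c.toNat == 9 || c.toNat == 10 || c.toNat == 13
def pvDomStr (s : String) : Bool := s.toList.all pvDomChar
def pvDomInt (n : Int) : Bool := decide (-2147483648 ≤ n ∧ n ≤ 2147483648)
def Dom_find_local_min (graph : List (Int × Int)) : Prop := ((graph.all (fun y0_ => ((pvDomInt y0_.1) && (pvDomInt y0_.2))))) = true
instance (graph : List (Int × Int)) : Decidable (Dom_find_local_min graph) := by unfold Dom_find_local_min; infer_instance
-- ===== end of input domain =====

-- B replaces A's inner min() recomputation over the growing dict of non-zero values with a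
-- precomputed prefix-minimum table followed by a separate selection pass (objective: faster).


-- ===== PORT A =====
def find_local_min (graph : List (Int × Int)) : List (Int × Int) :=
  let st := graph.foldl
    (fun (st : Option Int × PySem.Dict Int Int × PySem.Dict Int Int) kv =>
      let min_value := st.1
      let remove_zero := st.2.1
      let new_arr := st.2.2
      if kv.2 ≠ 0 then
        let remove_zero := remove_zero.insert kv.1 kv.2
        let min_value := PySem.List.min? remove_zero.values (fun y => y)
        let new_arr := if some kv.2 = min_value then new_arr.insert kv.1 kv.2 else new_arr
        (min_value, remove_zero, new_arr)
      else (min_value, remove_zero, new_arr))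
    (none, PySem.Dict.empty, PySem.Dict.empty)
  st.2.2.items

-- ===== PORT B =====
-- pass 2 of Source B: the prefix-minimum table ('running' starts as None)
def pvPrefixMins : Option Int → List Int → List Int
  | _, [] => []
  | none, v :: vs => v :: pvPrefixMins (some v) vs
  | some r, v :: vs => min r v :: pvPrefixMins (some (min r v)) vs

def find_local_min_alt (graph : List (Int × Int)) : List (Int × Int) :=
  let pairs := graph.filter (fun kv => kv.2 ≠ 0)
  let mins := pvPrefixMins none (pairs.map Prod.snd)
  let sel := ((pairs.zip mins).filter (fun pm => pm.1.2 = pm.2)).map Prod.fst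
  -- pass 3's dict comprehension: build the result dict from the selected pairs
  (sel.foldl (fun (d : PySem.Dict Int Int) kv => d.insert kv.1 kv.2) PySem.Dict.empty).items

-- ===== PRECONDITION & SPEC =====
-- graph is a Python dict, whose keys are necessarily distinct; a List (Int × Int) with
-- duplicate keys corresponds to no dict a caller could pass, so Pre_ requires distinct keys.
def Pre_find_local_min (graph : List (Int × Int)) : Prop := (graph.map Prod.fst).Nodup
instance (graph : List (Int × Int)) : Decidable (Pre_find_local_min graph) := by unfold Pre_find_local_min; infer_instance
def pvWitness_find_local_min : (List (Int × Int)) := [(1, 3), (2, 0), (3, 2), (4, 5), (5, 2)]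

def Spec_find_local_min (graph : List (Int × Int)) (out : List (Int × Int)) : Prop := out = find_local_min_alt graph
instance (graph : List (Int × Int)) (out : List (Int × Int)) : Decidable (Spec_find_local_min graph out) := by unfold Spec_find_local_min; infer_instance

-- ===== CLAIM (what is proved, stated in full; the proofs are below) =====
def Claim_equal_find_local_min : Prop := ∀ (graph : List (Int × Int)), Dom_find_local_min graph → Pre_find_local_min graph → Spec_find_local_min graph (find_local_min graph)

-- ===== LEMMAS AND PROOFS =====

-- the running minimum after one more value (B's 'running' update; also min over one more dict value)
def pvOmin : Option Int → Int → Int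
  | none, v => v
  | some m, v => min m v

-- the selected pairs, as one recursion over the input (both programs compute this list)
def pvSel : Option Int → List (Int × Int) → List (Int × Int)
  | _, [] => []
  | m, (k, v) :: t =>
    if v ≠ 0 then
      (if v = pvOmin m v then [(k, v)] else []) ++ pvSel (some (pvOmin m v)) t
    else pvSel m t

lemma pvSel_cons_zero (m : Option Int) (k : Int) (t : List (Int × Int)) :
    pvSel m ((k, 0) :: t) = pvSel m t := by simp [pvSel]

lemma pvSel_cons_pos (m : Option Int) (k v : Int) (t : List (Int × Int)) (hv : v ≠ 0)
    (hc : v = pvOmin m v) :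
    pvSel m ((k, v) :: t) = (k, v) :: pvSel (some (pvOmin m v)) t := by
  rw [pvSel, if_pos hv, if_pos hc]; rfl

lemma pvSel_cons_neg (m : Option Int) (k v : Int) (t : List (Int × Int)) (hv : v ≠ 0)
    (hc : ¬ v = pvOmin m v) :
    pvSel m ((k, v) :: t) = pvSel (some (pvOmin m v)) t := by
  rw [pvSel, if_pos hv, if_neg hc]; rfl

lemma pvSel_sublist (m : Option Int) (l : List (Int × Int)) : (pvSel m l).Sublist l := by
  induction l generalizing m with
  | nil => simp [pvSel]
  | cons p t ih =>
    obtain ⟨k, v⟩ := p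
    by_cases hv : v = 0
    · subst hv; rw [pvSel_cons_zero]; exact (ih m).cons _
    · by_cases hc : v = pvOmin m v
      · rw [pvSel_cons_pos m k v t hv hc]; exact (ih _).cons₂ _
      · rw [pvSel_cons_neg m k v t hv hc]; exact (ih _).cons _

lemma pvPrefixMins_cons (m : Option Int) (v : Int) (vs : List Int) :
    pvPrefixMins m (v :: vs) = pvOmin m v :: pvPrefixMins (some (pvOmin m v)) vs := by
  cases m <;> rfl

-- B's three passes compute pvSel
lemma pvAlt_eq_sel (l : List (Int × Int)) (m : Option Int) :
    ((((l.filter (fun kv => kv.2 ≠ 0)).zip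
        (pvPrefixMins m ((l.filter (fun kv => kv.2 ≠ 0)).map Prod.snd))).filter
      (fun pm => pm.1.2 = pm.2)).map Prod.fst) = pvSel m l := by
  induction l generalizing m with
  | nil => simp [pvSel]
  | cons p t ih =>
    obtain ⟨k, v⟩ := p
    by_cases hv : v = 0
    · subst hv; rw [pvSel_cons_zero]
      simpa using ih m
    · rw [List.filter_cons_of_pos (by simpa using hv), List.map_cons, pvPrefixMins_cons,
        List.zip_cons_cons]
      by_cases hc : v = pvOmin m v
      · rw [List.filter_cons_of_pos (by simpa using hc), List.map_cons,
          pvSel_cons_pos m k v t hv hc, ih]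
      · rw [List.filter_cons_of_neg (by simpa using hc), pvSel_cons_neg m k v t hv hc, ih]

lemma pvMin?_append_singleton (vs : List Int) (v : Int) :
    PySem.List.min? (vs ++ [v]) (fun y => y) = some (pvOmin (PySem.List.min? vs (fun y => y)) v) := by
  cases vs with
  | nil => simp [PySem.List.min?, pvOmin]
  | cons x t =>
    rw [List.cons_append, PySem.List.min?_id_cons, PySem.List.min?_id_cons]
    simp [List.foldl_append, pvOmin]

-- A's single loop computes pvSel as well (invariant over the fold)
lemma pvLoopA_items (l : List (Int × Int)) (m : Option Int) (rz na : PySem.Dict Int Int)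
    (hnd : (l.map Prod.fst).Nodup)
    (hrz : ∀ p ∈ l, rz.contains p.1 = false)
    (hna : ∀ p ∈ l, na.contains p.1 = false)
    (hm : PySem.List.min? rz.values (fun y => y) = m) :
    (l.foldl
      (fun (st : Option Int × PySem.Dict Int Int × PySem.Dict Int Int) kv =>
        let min_value := st.1
        let remove_zero := st.2.1
        let new_arr := st.2.2
        if kv.2 ≠ 0 then
          let remove_zero := remove_zero.insert kv.1 kv.2
          let min_value := PySem.List.min? remove_zero.values (fun y => y)
          let new_arr := if some kv.2 = min_value then new_arr.insert kv.1 kv.2 else new_arr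
          (min_value, remove_zero, new_arr)
        else (min_value, remove_zero, new_arr))
      (m, rz, na)).2.2.items = na.items ++ pvSel m l := by
  induction l generalizing m rz na with
  | nil => simp [pvSel]
  | cons p t ih =>
    obtain ⟨k, v⟩ := p
    rw [List.map_cons, List.nodup_cons] at hnd
    obtain ⟨hk, hndt⟩ := hnd
    rw [List.foldl_cons]
    by_cases hv : v = 0
    · subst hv
      simp only [ne_eq, not_true_eq_false, if_false]
      rw [pvSel_cons_zero]
      exact ih m rz na hndt (fun p hp => hrz p (List.mem_cons_of_mem _ hp))
        (fun p hp => hna p (List.mem_cons_of_mem _ hp)) hm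
    · have hvals : (rz.insert k v).values = rz.values ++ [v] := by
        show ((rz.insert k v).items.map (·.2)) = _
        rw [PySem.Dict.items_insert_of_not_contains rz v (hrz (k, v) List.mem_cons_self)]
        simp [PySem.Dict.values]
      have hm' : PySem.List.min? ((rz.insert k v).values) (fun y => y) = some (pvOmin m v) := by
        rw [hvals, pvMin?_append_singleton, hm]
      simp only [ne_eq, hv, not_false_eq_true, if_true, hm', Option.some.injEq]
      have hk' : k ∉ List.map Prod.fst t := by simpa using hk
      have hne : ∀ p ∈ t, p.1 ≠ k := by
        intro p hp h
        exact hk' (h ▸ List.mem_map_of_mem (f := Prod.fst) hp)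
      have hfr : ∀ (d : PySem.Dict Int Int) (w : Int), (∀ p ∈ (k, v) :: t, d.contains p.1 = false) →
          ∀ p ∈ t, (d.insert k w).contains p.1 = false := by
        intro d w hd p hp
        rw [PySem.Dict.contains_insert]
        simp [hne p hp, hd p (List.mem_cons_of_mem _ hp)]
      by_cases hc : v = pvOmin m v
      · rw [if_pos hc, pvSel_cons_pos m k v t hv hc,
          ih (some (pvOmin m v)) (rz.insert k v) (na.insert k v) hndt (hfr rz v hrz)
            (hfr na v hna) hm',
          PySem.Dict.items_insert_of_not_contains na v (hna (k, v) List.mem_cons_self),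
          List.append_assoc]
        rfl
      · rw [if_neg hc, pvSel_cons_neg m k v t hv hc]
        exact ih (some (pvOmin m v)) (rz.insert k v) na hndt (hfr rz v hrz)
          (fun p hp => hna p (List.mem_cons_of_mem _ hp)) hm'

theorem pv_main (graph : List (Int × Int)) (h : (graph.map Prod.fst).Nodup) :
    find_local_min graph = find_local_min_alt graph := by
  have hA : find_local_min graph = pvSel none graph := by
    unfold find_local_min
    rw [pvLoopA_items graph none PySem.Dict.empty PySem.Dict.empty h
      (fun p _ => PySem.Dict.contains_empty p.1) (fun p _ => PySem.Dict.contains_empty p.1)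
      (by simp [PySem.Dict.empty, PySem.Dict.values, PySem.List.min?])]
    simp [PySem.Dict.empty]
  have hsel : ((((graph.filter (fun kv => kv.2 ≠ 0)).zip
        (pvPrefixMins none ((graph.filter (fun kv => kv.2 ≠ 0)).map Prod.snd))).filter
      (fun pm => pm.1.2 = pm.2)).map Prod.fst) = pvSel none graph := pvAlt_eq_sel graph none
  have hnd : ((pvSel none graph).map Prod.fst).Nodup :=
    h.sublist ((pvSel_sublist none graph).map Prod.fst)
  have hB : find_local_min_alt graph = pvSel none graph := by
    show (List.foldl (fun (d : PySem.Dict Int Int) kv => d.insert kv.1 kv.2) PySem.Dict.empty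
      ((((graph.filter (fun kv => kv.2 ≠ 0)).zip
        (pvPrefixMins none ((graph.filter (fun kv => kv.2 ≠ 0)).map Prod.snd))).filter
      (fun pm => pm.1.2 = pm.2)).map Prod.fst)).items = pvSel none graph
    rw [hsel]
    rw [PySem.Dict.items_foldl_insert_fresh (pvSel none graph) (k := Prod.fst) (v := Prod.snd)
      PySem.Dict.empty (fun a _ => PySem.Dict.contains_empty a.1) hnd]
    simp [PySem.Dict.empty]
  rw [hA, hB]

-- ===== VERDICT (by name: the statement is the Claim_ definition above) =====
theorem find_local_min_spec : Claim_equal_find_local_min := by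
  intro graph _ hpre
  exact pv_main graph hpre
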